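-- pv_equiv track=rewrite | github.com/LellaHemasriSai/RegexToLike | translation.py | split_at_top_level_or
-- ===== SOURCE A (Python) =====
-- def split_at_top_level_or(pattern):
--     """
--     Splits the pattern at the top-level '|' operators, respecting parentheses and escaped characters.
--     """
--     subpatterns = []
--     current = ''
--     stack = []
--     escaped = False
--     for c in pattern:
--         if escaped:
--             current += c
--             escaped = False
--         elif c == '\\':
--             current += c
--             escaped = True
--         elif c == '(':
--             stack.append(c)
--             current += c
--         elif c == ')':
--             if stack:
--                 stack.pop()
--             current += c
--         elif c == '|' and not stack:
--             subpatterns.append(current)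
--             current = ''
--         else:
--             current += c
--     if current:
--         subpatterns.append(current)
--     return subpatterns
-- ===== SOURCE B (Python) =====
-- def split_at_top_level_or(pattern):
--     depth = 0
--     escaped = False
--     for i, c in enumerate(pattern):
--         if escaped:
--             escaped = False
--         elif c == '\\':
--             escaped = True
--         elif c == '(':
--             depth += 1
--         elif c == ')':
--             if depth:
--                 depth -= 1
--         elif c == '|' and depth == 0:
--             return [pattern[:i]] + split_at_top_level_or(pattern[i + 1:])
--     return [pattern] if pattern else []
-- ===== Notes on version B (the rewrite author's own statement) =====
-- stated objective: alternative
-- what changed: Replaces A's single-pass accumulator fold (subpatterns list + current buffer + paren stack) with a recursive head-splitting decomposition: scan for the first top-level OR operator, emit the slice before it, and recurse on the remainder of the string.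
import Mathlib
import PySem

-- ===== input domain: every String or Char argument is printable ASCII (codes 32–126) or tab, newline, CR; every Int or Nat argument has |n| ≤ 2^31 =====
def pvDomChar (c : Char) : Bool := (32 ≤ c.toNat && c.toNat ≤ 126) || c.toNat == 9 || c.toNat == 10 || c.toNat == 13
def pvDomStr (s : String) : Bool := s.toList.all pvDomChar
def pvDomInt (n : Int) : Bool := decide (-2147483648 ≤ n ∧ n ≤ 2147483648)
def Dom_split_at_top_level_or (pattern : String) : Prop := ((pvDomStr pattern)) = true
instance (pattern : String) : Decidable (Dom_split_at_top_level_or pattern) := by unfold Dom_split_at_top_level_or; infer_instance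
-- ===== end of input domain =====

-- B replaces A's accumulator fold by a recursive head-splitting decomposition (same cost; objective: alternative).

-- ===== PORT A =====
-- state: (subpatterns, current, stack, escaped); strings carried as List Char, turned into String at the end.
def pvStepA (st : List (List Char) × List Char × List Char × Bool) (c : Char) :
    List (List Char) × List Char × List Char × Bool :=
  match st with
  | (subs, cur, stack, esc) =>
    if esc then (subs, cur ++ [c], stack, false)
    else if c = '\\' then (subs, cur ++ [c], stack, true)
    else if c = '(' then (subs, cur ++ [c], stack ++ [c], esc)
    else if c = ')' then (subs, cur ++ [c], if stack.isEmpty then stack else stack.dropLast, esc)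
    else if c = '|' ∧ stack.isEmpty then (subs ++ [cur], [], stack, esc)
    else (subs, cur ++ [c], stack, esc)

def pvCoreA (l : List Char) : List (List Char) :=
  let st := l.foldl pvStepA ([], [], [], false)
  if st.2.1.isEmpty then st.1 else st.1 ++ [st.2.1]

def split_at_top_level_or (pattern : String) : List String :=
  (pvCoreA pattern.toList).map String.mk

-- ===== PORT B =====
-- index of the first top-level '|' (depth counter + escape flag), as in Source B's for loop
def pvFindPipe : List Char → Nat → Bool → Option Nat
  | [], _, _ => none
  | c :: rest, depth, esc =>
    if esc then (pvFindPipe rest depth false).map (· + 1)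
    else if c = '\\' then (pvFindPipe rest depth true).map (· + 1)
    else if c = '(' then (pvFindPipe rest (depth + 1) esc).map (· + 1)
    else if c = ')' then (pvFindPipe rest (depth - 1) esc).map (· + 1)
    else if c = '|' ∧ depth = 0 then some 0
    else (pvFindPipe rest depth esc).map (· + 1)

theorem pvFindPipe_lt : ∀ (l : List Char) (d : Nat) (e : Bool) (i : Nat),
    pvFindPipe l d e = some i → i < l.length := by
  intro l
  induction l with
  | nil => intro d e i h; simp [pvFindPipe] at h
  | cons c rest ih =>
    intro d e i h
    simp only [pvFindPipe] at h
    split_ifs at h with h1 h2 h3 h4 h5 <;>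
      first
        | (simp only [Option.map_eq_some_iff] at h
           obtain ⟨j, hj, rfl⟩ := h
           have := ih _ _ _ hj
           simp; omega)
        | (simp_all; omega)

def pvCoreB (l : List Char) : List (List Char) :=
  match h : pvFindPipe l 0 false with
  | some i => l.take i :: pvCoreB (l.drop (i + 1))
  | none => if l.isEmpty then [] else [l]
termination_by l.length
decreasing_by
  have := pvFindPipe_lt l 0 false i h
  simp [List.length_drop]; omega

def split_at_top_level_or_alt (pattern : String) : List String :=
  (pvCoreB pattern.toList).map String.mk

-- ===== PRECONDITION & SPEC =====
def Spec_split_at_top_level_or (pattern : String) (out : List String) : Prop := out = split_at_top_level_or_alt pattern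
instance (pattern : String) (out : List String) : Decidable (Spec_split_at_top_level_or pattern out) := by unfold Spec_split_at_top_level_or; infer_instance

-- ===== CLAIM (what is proved, stated in full; the proofs are below) =====
def Claim_equal_split_at_top_level_or : Prop := ∀ (pattern : String), Dom_split_at_top_level_or pattern → Spec_split_at_top_level_or pattern (split_at_top_level_or pattern)

-- ===== LEMMAS AND PROOFS =====

-- when a top-level pipe is found at index i, A's fold commutes the prefix into a finished subpattern
theorem pvFold_some : ∀ (l stack : List Char) (esc : Bool) (subs : List (List Char)) (cur : List Char) (i : Nat),
    pvFindPipe l stack.length esc = some i →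
    l.foldl pvStepA (subs, cur, stack, esc) =
      (l.drop (i + 1)).foldl pvStepA (subs ++ [cur ++ l.take i], [], [], false) := by
  intro l
  induction l with
  | nil => intro stack esc subs cur i h; simp [pvFindPipe] at h
  | cons c rest ih =>
    intro stack esc subs cur i h
    simp only [pvFindPipe] at h
    cases esc with
    | true =>
      rw [if_pos rfl] at h
      obtain ⟨j, hj, hji⟩ := Option.map_eq_some_iff.mp h
      subst hji
      have hs : pvStepA (subs, cur, stack, true) c = (subs, cur ++ [c], stack, false) := by
        simp [pvStepA]
      rw [List.foldl_cons, hs, ih stack false subs (cur ++ [c]) j hj]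
      simp
    | false =>
      rw [if_neg (by simp)] at h
      by_cases h2 : c = '\\'
      · rw [if_pos h2] at h
        obtain ⟨j, hj, hji⟩ := Option.map_eq_some_iff.mp h
        subst hji
        have hs : pvStepA (subs, cur, stack, false) c = (subs, cur ++ [c], stack, true) := by
          simp [pvStepA, h2]
        rw [List.foldl_cons, hs, ih stack true subs (cur ++ [c]) j hj]
        simp
      · rw [if_neg h2] at h
        by_cases h3 : c = '('
        · rw [if_pos h3] at h
          obtain ⟨j, hj, hji⟩ := Option.map_eq_some_iff.mp h
          subst hji
          have hs : pvStepA (subs, cur, stack, false) c = (subs, cur ++ [c], stack ++ [c], false) := by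
            simp [pvStepA, h2, h3]
          have hlen : (stack ++ [c]).length = stack.length + 1 := by simp
          rw [List.foldl_cons, hs, ih (stack ++ [c]) false subs (cur ++ [c]) j (by rw [hlen]; exact hj)]
          simp
        · rw [if_neg h3] at h
          by_cases h4 : c = ')'
          · rw [if_pos h4] at h
            obtain ⟨j, hj, hji⟩ := Option.map_eq_some_iff.mp h
            subst hji
            have hs : pvStepA (subs, cur, stack, false) c =
                (subs, cur ++ [c], if stack.isEmpty then stack else stack.dropLast, false) := by
              simp [pvStepA, h2, h3, h4]
            have hlen : (if stack.isEmpty then stack else stack.dropLast).length = stack.length - 1 := by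
              cases stack <;> simp
            rw [List.foldl_cons, hs, ih _ false subs (cur ++ [c]) j (by rw [hlen]; exact hj)]
            simp
          · rw [if_neg h4] at h
            by_cases hc : c = '|' ∧ stack = []
            · obtain ⟨hc1, hc2⟩ := hc
              subst hc2
              rw [if_pos (by simp [hc1])] at h
              have hi : i = 0 := by exact (Option.some_inj.mp h).symm
              subst hi
              have hs : pvStepA (subs, cur, [], false) c = (subs ++ [cur], [], [], false) := by
                simp [pvStepA, h2, h3, h4, hc1]
              rw [List.foldl_cons, hs]
              simp
            · have hcond : ¬ (c = '|' ∧ stack.length = 0) := by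
                intro ⟨a, b⟩; exact hc ⟨a, List.eq_nil_of_length_eq_zero b⟩
              rw [if_neg hcond] at h
              obtain ⟨j, hj, hji⟩ := Option.map_eq_some_iff.mp h
              subst hji
              have hs : pvStepA (subs, cur, stack, false) c = (subs, cur ++ [c], stack, false) := by
                by_cases hc5 : c = '|'
                · have hst : stack ≠ [] := fun e => hc ⟨hc5, e⟩
                  have : ¬ (c = '|' ∧ stack.isEmpty = true) := by
                    intro ⟨_, e⟩; exact hst (List.isEmpty_iff.mp e)
                  simp only [pvStepA]
                  rw [if_neg (by simp), if_neg h2, if_neg h3, if_neg h4, if_neg this]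
                · simp only [pvStepA]
                  rw [if_neg (by simp), if_neg h2, if_neg h3, if_neg h4,
                      if_neg (by intro ⟨a, _⟩; exact hc5 a)]
              rw [List.foldl_cons, hs, ih stack false subs (cur ++ [c]) j hj]
              simp

-- when no top-level pipe remains, A's fold only extends the current buffer
theorem pvFold_none : ∀ (l stack : List Char) (esc : Bool) (subs : List (List Char)) (cur : List Char),
    pvFindPipe l stack.length esc = none →
    (l.foldl pvStepA (subs, cur, stack, esc)).1 = subs ∧
    (l.foldl pvStepA (subs, cur, stack, esc)).2.1 = cur ++ l := by
  intro l
  induction l with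
  | nil => intro stack esc subs cur h; simp
  | cons c rest ih =>
    intro stack esc subs cur h
    simp only [pvFindPipe] at h
    cases esc with
    | true =>
      rw [if_pos rfl] at h
      rw [Option.map_eq_none_iff] at h
      have hs : pvStepA (subs, cur, stack, true) c = (subs, cur ++ [c], stack, false) := by
        simp [pvStepA]
      rw [List.foldl_cons, hs]
      have := ih stack false subs (cur ++ [c]) h
      simpa using this
    | false =>
      rw [if_neg (by simp)] at h
      by_cases h2 : c = '\\'
      · rw [if_pos h2, Option.map_eq_none_iff] at h
        have hs : pvStepA (subs, cur, stack, false) c = (subs, cur ++ [c], stack, true) := by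
          simp [pvStepA, h2]
        rw [List.foldl_cons, hs]
        simpa using ih stack true subs (cur ++ [c]) h
      · rw [if_neg h2] at h
        by_cases h3 : c = '('
        · rw [if_pos h3, Option.map_eq_none_iff] at h
          have hs : pvStepA (subs, cur, stack, false) c = (subs, cur ++ [c], stack ++ [c], false) := by
            simp [pvStepA, h2, h3]
          have hlen : (stack ++ [c]).length = stack.length + 1 := by simp
          rw [List.foldl_cons, hs]
          simpa using ih (stack ++ [c]) false subs (cur ++ [c]) (by rw [hlen]; exact h)
        · rw [if_neg h3] at h
          by_cases h4 : c = ')'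
          · rw [if_pos h4, Option.map_eq_none_iff] at h
            have hs : pvStepA (subs, cur, stack, false) c =
                (subs, cur ++ [c], if stack.isEmpty then stack else stack.dropLast, false) := by
              simp [pvStepA, h2, h3, h4]
            have hlen : (if stack.isEmpty then stack else stack.dropLast).length = stack.length - 1 := by
              cases stack <;> simp
            rw [List.foldl_cons, hs]
            simpa using ih _ false subs (cur ++ [c]) (by cases stack <;> simpa using h)
          · rw [if_neg h4] at h
            by_cases hc : c = '|' ∧ stack = []
            · obtain ⟨hc1, hc2⟩ := hc
              subst hc2
              rw [if_pos (by simp [hc1])] at h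
              exact absurd h (by simp)
            · have hcond : ¬ (c = '|' ∧ stack.length = 0) := by
                intro ⟨a, b⟩; exact hc ⟨a, List.eq_nil_of_length_eq_zero b⟩
              rw [if_neg hcond, Option.map_eq_none_iff] at h
              have hs : pvStepA (subs, cur, stack, false) c = (subs, cur ++ [c], stack, false) := by
                by_cases hc5 : c = '|'
                · have hst : stack ≠ [] := fun e => hc ⟨hc5, e⟩
                  have : ¬ (c = '|' ∧ stack.isEmpty = true) := by
                    intro ⟨_, e⟩; exact hst (List.isEmpty_iff.mp e)
                  simp only [pvStepA]
                  rw [if_neg (by simp), if_neg h2, if_neg h3, if_neg h4, if_neg this]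
                · simp only [pvStepA]
                  rw [if_neg (by simp), if_neg h2, if_neg h3, if_neg h4,
                      if_neg (by intro ⟨a, _⟩; exact hc5 a)]
              rw [List.foldl_cons, hs]
              simpa using ih stack false subs (cur ++ [c]) h

theorem pvCore_eq : ∀ (n : Nat) (l : List Char), l.length = n → ∀ (subs : List (List Char)),
    (let st := l.foldl pvStepA (subs, [], [], false)
     if st.2.1.isEmpty then st.1 else st.1 ++ [st.2.1]) = subs ++ pvCoreB l := by
  intro n
  induction n using Nat.strong_induction_on with
  | _ n ih =>
    intro l hn subs
    match hfp : pvFindPipe l 0 false with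
    | some i =>
      have hlt := pvFindPipe_lt l 0 false i hfp
      have hsplit := pvFold_some l [] false subs [] i (by simpa using hfp)
      rw [pvCoreB, hfp]
      simp only [List.nil_append] at hsplit
      simp only [hsplit]
      have := ih (l.drop (i + 1)).length (by simp [List.length_drop]; omega)
        (l.drop (i + 1)) rfl (subs ++ [l.take i])
      simp only [this]
      simp
    | none =>
      have h := pvFold_none l [] false subs [] (by simpa using hfp)
      rw [pvCoreB, hfp]
      simp only []
      rw [h.1, h.2]
      cases l <;> simp

-- ===== VERDICT (by name: the statement is the Claim_ definition above) =====
theorem split_at_top_level_or_spec : Claim_equal_split_at_top_level_or := by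
  intro pattern _
  unfold Spec_split_at_top_level_or split_at_top_level_or split_at_top_level_or_alt pvCoreA
  have h := pvCore_eq pattern.toList.length pattern.toList rfl []
  simp only [List.nil_append] at h
  exact congrArg (List.map String.mk) h
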